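-- pv_equiv track=rewrite | github.com/Tien30032006/Logic-Puzzle | src/nonogram.py | solve_nonogram_brfs
-- ===== SOURCE A (Python) =====
-- import copy
-- from collections import deque
--
-- def get_permutations(clues, length):
--     if not clues: return [[-1] * length]
--     perms = []
--     c = clues[0]
--     min_rest = sum(clues[1:]) + len(clues[1:])
--     for i in range(length - c - min_rest + 1):
--         prefix = [-1] * i + [1] * c
--         if len(clues) == 1:
--             perms.append(prefix + [-1] * (length - len(prefix)))
--         else:
--             for rest in get_permutations(clues[1:], length - len(prefix) - 1):
--                 perms.append(prefix + [-1] + rest)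
--     return perms
--
-- def is_valid_partial_board(board, col_perms, row_idx):
--     rows, cols = len(board), len(board[0])
--     for j in range(cols):
--         assigned_cells = [(i, board[i][j]) for i in range(row_idx + 1)]
--         match_found = False
--         for p in col_perms[j]:
--             match = True
--             for idx, val in assigned_cells:
--                 if p[idx] != val:
--                     match = False
--                     break
--             if match:
--                 match_found = True
--                 break
--         if not match_found:
--             return False
--     return True
--
-- def solve_nonogram_brfs(row_clues, col_clues):
--     rows, cols = len(row_clues), len(col_clues)
--     row_perms = [get_permutations(c, cols) for c in row_clues]
--     col_perms = [get_permutations(c, rows) for c in col_clues]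
--
--     initial_board = [[0] * cols for _ in range(rows)]
--
--     queue = deque([(0, initial_board)])
--
--     game_history = [copy.deepcopy(initial_board)]
--     action_history = ["Bắt đầu Blind Search (BrFS)"]
--
--     while queue:
--         row_idx, current_board = queue.popleft()
--
--         if row_idx > 0:
--             game_history.append(copy.deepcopy(current_board))
--             action_history.append(f"BrFS Duyệt: Loang rộng ở hàng {row_idx}")
--
--         if row_idx == rows:
--             game_history.append(copy.deepcopy(current_board))
--             action_history.append("🎉 Đã điền xong bảng! TÌM THẤY GIẢI PHÁP BẰNG BLIND SEARCH (BrFS).")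
--             return game_history, action_history
--
--         for p in row_perms[row_idx]:
--             new_board = copy.deepcopy(current_board)
--             new_board[row_idx] = p
--
--             if is_valid_partial_board(new_board, col_perms, row_idx):
--                 queue.append((row_idx + 1, new_board))
--
--     action_history.append("❌ Không tìm thấy giải pháp bằng Blind Search (BrFS).")
--     return game_history, action_history
-- ===== SOURCE B (Python) =====
-- def get_permutations(clues, length):
--     if not clues: return [[-1] * length]
--     perms = []
--     c = clues[0]
--     min_rest = sum(clues[1:]) + len(clues[1:])
--     for i in range(length - c - min_rest + 1):
--         prefix = [-1] * i + [1] * c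
--         if len(clues) == 1:
--             perms.append(prefix + [-1] * (length - len(prefix)))
--         else:
--             for rest in get_permutations(clues[1:], length - len(prefix) - 1):
--                 perms.append(prefix + [-1] + rest)
--     return perms
--
-- def _children(board, survivors, p, k, cols):
--     # survivors of (board with row k set to p): filter each column's list by the new row only
--     ns = [[q for q in survivors[j] if q[k] == p[j]] for j in range(cols)]
--     if all(ns):
--         return [(board[:k] + [p] + board[k + 1:], ns)]
--     return []
--
-- def solve_nonogram_brfs(row_clues, col_clues):
--     # Level-synchronised BrFS without a queue: the whole frontier of row k is one
--     # list, and each frontier node carries the column permutations still consistent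
--     # with its filled rows, so validity is a one-row filter of those survivors
--     # instead of A's rescan of every previous row against all column permutations.
--     rows, cols = len(row_clues), len(col_clues)
--     row_perms = [get_permutations(c, cols) for c in row_clues]
--     col_perms = [get_permutations(c, rows) for c in col_clues]
--
--     initial_board = [[0] * cols for _ in range(rows)]
--     game_history = [[r[:] for r in initial_board]]
--     action_history = ["Bắt đầu Blind Search (BrFS)"]
--
--     level = [(initial_board, col_perms)]
--     for k in range(rows):
--         if k > 0:
--             for b, _ in level:
--                 game_history.append([r[:] for r in b])
--                 action_history.append(f"BrFS Duyệt: Loang rộng ở hàng {k}")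
--         level = [child for b, s in level for p in row_perms[k]
--                  for child in _children(b, s, p, k, cols)]
--         if not level:
--             action_history.append("❌ Không tìm thấy giải pháp bằng Blind Search (BrFS).")
--             return game_history, action_history
--
--     b0 = level[0][0]
--     if rows > 0:
--         game_history.append([r[:] for r in b0])
--         action_history.append(f"BrFS Duyệt: Loang rộng ở hàng {rows}")
--     game_history.append([r[:] for r in b0])
--     action_history.append("🎉 Đã điền xong bảng! TÌM THẤY GIẢI PHÁP BẰNG BLIND SEARCH (BrFS).")
--     return game_history, action_history
-- ===== Notes on version B (the rewrite author's own statement) =====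
-- stated objective: faster
-- what changed: B replaces A's fuelled FIFO-queue loop and is_valid_partial_board rescan by a level-synchronised frontier: the whole row-k frontier is processed as one list per iteration of a for-loop over rows, and each frontier node carries the column permutations still consistent with its filled rows, so validity is a one-row filter of those survivors instead of rescanning all previous rows against every column permutation.
import Mathlib
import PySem

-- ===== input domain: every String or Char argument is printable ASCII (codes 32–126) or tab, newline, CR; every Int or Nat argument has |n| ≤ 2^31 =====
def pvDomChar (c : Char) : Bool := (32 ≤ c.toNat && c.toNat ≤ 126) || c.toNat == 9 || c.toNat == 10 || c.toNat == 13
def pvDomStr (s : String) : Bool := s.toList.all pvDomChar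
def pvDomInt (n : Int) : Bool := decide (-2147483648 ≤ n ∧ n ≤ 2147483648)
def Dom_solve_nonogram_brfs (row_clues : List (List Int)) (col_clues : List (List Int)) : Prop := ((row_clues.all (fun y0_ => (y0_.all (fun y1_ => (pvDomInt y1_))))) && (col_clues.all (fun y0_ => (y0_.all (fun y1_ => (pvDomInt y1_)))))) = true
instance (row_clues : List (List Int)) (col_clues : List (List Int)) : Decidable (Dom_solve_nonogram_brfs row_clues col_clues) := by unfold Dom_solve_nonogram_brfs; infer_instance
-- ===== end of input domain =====

-- B replaces A's fuelled queue loop and its full rescan of previous rows (is_valid_partial_board)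
-- by a level-synchronised frontier (one list per row, recursion over rows) whose nodes carry the
-- column permutations still consistent with their filled rows; same histories (objective: faster).

-- shared message constants (string literals of both Pythons)
def pvStartMsg : String := "Bắt đầu Blind Search (BrFS)"
def pvVisitMsg (r : Nat) : String := "BrFS Duyệt: Loang rộng ở hàng " ++ PySem.Int.toStr (r : Int)
def pvWinMsg : String := "🎉 Đã điền xong bảng! TÌM THẤY GIẢI PHÁP BẰNG BLIND SEARCH (BrFS)."
def pvFailMsg : String := "❌ Không tìm thấy giải pháp bằng Blind Search (BrFS)."

-- ===== PORT A =====
-- get_permutations, fuel = clues.length (the fuel-0 nonempty case is unreachable)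
def pvGpAux : Nat → List Int → Int → List (List Int)
  | _, [], len => [List.replicate len.toNat (-1)]
  | 0, _ :: _, _ => []
  | n+1, c :: rest, len =>
    let min_rest : Int := rest.sum + rest.length
    (PySem.List.pyRange 0 (len - c - min_rest + 1) 1).foldl (fun perms i =>
      let pre := List.replicate i.toNat (-1) ++ List.replicate c.toNat 1
      perms ++ (if rest = [] then
          [pre ++ List.replicate (len - (pre.length : Int)).toNat (-1)]
        else
          (pvGpAux n rest (len - (pre.length : Int) - 1)).map (fun r => pre ++ [-1] ++ r))) []

def pvGetPermutations (clues : List Int) (len : Int) : List (List Int) :=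
  pvGpAux clues.length clues len

def pvIsValid (board : List (List Int)) (col_perms : List (List (List Int))) (row_idx : Nat) : Bool :=
  let cols := (board.headD []).length
  (List.range cols).all (fun j =>
    let assigned := (List.range (row_idx + 1)).map (fun i => (i, (board.getD i []).getD j 0))
    (col_perms.getD j []).any (fun p => assigned.all (fun iv => p.getD iv.1 0 == iv.2)))

-- the while loop of A; fuel bounds the number of iterations (guard only, the step is A's body)
def pvLoopA (row_perms col_perms : List (List (List Int))) (rows : Nat) :
    Nat → List (Nat × List (List Int)) → List (List (List Int)) → List String →
    List (List (List Int)) × List String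
  | 0, _, gh, ah => (gh, ah)
  | _ + 1, [], gh, ah => (gh, ah ++ [pvFailMsg])
  | fuel + 1, (row_idx, board) :: queue, gh, ah =>
    let gh' := if 0 < row_idx then gh ++ [board] else gh
    let ah' := if 0 < row_idx then ah ++ [pvVisitMsg row_idx] else ah
    if row_idx = rows then
      (gh' ++ [board], ah' ++ [pvWinMsg])
    else
      let children := (row_perms.getD row_idx []).foldl (fun acc p =>
        let nb := board.set row_idx p
        if pvIsValid nb col_perms row_idx then acc ++ [(row_idx + 1, nb)] else acc) []
      pvLoopA row_perms col_perms rows fuel (queue ++ children) gh' ah'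

def solve_nonogram_brfs (row_clues : List (List Int)) (col_clues : List (List Int)) : List (List (List Int)) × List String :=
  let rows := row_clues.length
  let cols := col_clues.length
  let row_perms := row_clues.map (fun c => pvGetPermutations c (cols : Int))
  let col_perms := col_clues.map (fun c => pvGetPermutations c (rows : Int))
  let initial_board := List.replicate rows (List.replicate cols (0 : Int))
  let fuel := (rows + 2) * row_perms.foldl (fun a ps => a * (ps.length + 1)) 1
  pvLoopA row_perms col_perms rows fuel [(0, initial_board)] [initial_board] [pvStartMsg]

-- ===== PORT B =====
-- _children of Source B: the one frontier node produced by placing row permutation p at row k, or none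
def pvChildB (cols k : Nat) (bs : List (List Int) × List (List (List Int))) (p : List Int) :
    List (List (List Int) × List (List (List Int))) :=
  let ns := (List.range cols).map (fun j =>
    (bs.2.getD j []).filter (fun q => q.getD k 0 == p.getD j 0))
  if ns.all (fun s => !s.isEmpty) then [(bs.1.take k ++ [p] ++ bs.1.drop (k + 1), ns)] else []

-- the for-loop over rows of Source B: n rows remain, k is the current row, level is the frontier
def pvLoopB (rp : List (List (List Int))) (rows cols : Nat) :
    Nat → Nat → List (List (List Int) × List (List (List Int))) →
    List (List (List Int)) → List String → List (List (List Int)) × List String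
  | 0, _, level, gh, ah =>
    let b0 := (level.headD ([], [])).1
    let gh' := if 0 < rows then gh ++ [b0] else gh
    let ah' := if 0 < rows then ah ++ [pvVisitMsg rows] else ah
    (gh' ++ [b0], ah' ++ [pvWinMsg])
  | n + 1, k, level, gh, ah =>
    let gh' := if 0 < k then gh ++ level.map (fun bs => bs.1) else gh
    let ah' := if 0 < k then ah ++ level.map (fun _ => pvVisitMsg k) else ah
    let nxt := level.flatMap (fun bs => (rp.getD k []).flatMap (fun p => pvChildB cols k bs p))
    if nxt = [] then (gh', ah' ++ [pvFailMsg])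
    else pvLoopB rp rows cols n (k + 1) nxt gh' ah'

def solve_nonogram_brfs_alt (row_clues : List (List Int)) (col_clues : List (List Int)) : List (List (List Int)) × List String :=
  let rows := row_clues.length
  let cols := col_clues.length
  let row_perms := row_clues.map (fun c => pvGetPermutations c (cols : Int))
  let col_perms := col_clues.map (fun c => pvGetPermutations c (rows : Int))
  let initial_board := List.replicate rows (List.replicate cols (0 : Int))
  pvLoopB row_perms rows cols rows 0 [(initial_board, col_perms)] [initial_board] [pvStartMsg]

-- ===== PRECONDITION & SPEC =====
-- Pre_ excludes inputs where negative clue entries make the permutation generator emit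
-- rows of the wrong length and the search can reach them (A, and B alike, typically raises
-- IndexError there; on some such inputs A happens to return and B returns the same value).
-- Admitted: all clues nonnegative; or no rows; or the search is provably cut off at a row k
-- whose clues cannot fit (its permutation list is empty) after k all-nonnegative rows
-- (with all-nonnegative column clues when k > 0, so the validity checks before row k are safe).
def Pre_solve_nonogram_brfs (row_clues : List (List Int)) (col_clues : List (List Int)) : Prop :=
  ((∀ c ∈ row_clues, ∀ x ∈ c, 0 ≤ x) ∧ (∀ c ∈ col_clues, ∀ x ∈ c, 0 ≤ x)) ∨
  row_clues = [] ∨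
  (∃ k < row_clues.length,
    (k = 0 ∨ (∀ c ∈ col_clues, ∀ x ∈ c, 0 ≤ x)) ∧
    (∀ i < k, ∀ x ∈ row_clues.getD i [], 0 ≤ x) ∧
    (row_clues.getD k []).sum + ((row_clues.getD k []).length : Int) ≥ (col_clues.length : Int) + 2)
instance (row_clues : List (List Int)) (col_clues : List (List Int)) : Decidable (Pre_solve_nonogram_brfs row_clues col_clues) := by unfold Pre_solve_nonogram_brfs; infer_instance

def pvWitness_solve_nonogram_brfs : List (List Int) × List (List Int) := ([[1]], [[1]])

def Spec_solve_nonogram_brfs (row_clues : List (List Int)) (col_clues : List (List Int)) (out : List (List (List Int)) × List String) : Prop := out = solve_nonogram_brfs_alt row_clues col_clues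
instance (row_clues : List (List Int)) (col_clues : List (List Int)) (out : List (List (List Int)) × List String) : Decidable (Spec_solve_nonogram_brfs row_clues col_clues out) := by unfold Spec_solve_nonogram_brfs; infer_instance

-- ===== CLAIM (what is proved, stated in full; the proofs are below) =====
def Claim_equal_solve_nonogram_brfs : Prop := ∀ (row_clues : List (List Int)) (col_clues : List (List Int)), Dom_solve_nonogram_brfs row_clues col_clues → Pre_solve_nonogram_brfs row_clues col_clues → Spec_solve_nonogram_brfs row_clues col_clues (solve_nonogram_brfs row_clues col_clues)

-- ===== LEMMAS AND PROOFS =====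

-- survivors carried by a B-node (row k, board b): per column j, the column permutations
-- consistent with rows 0..k-1 of b
def pvSurvSpec (col_perms : List (List (List Int))) (cols r : Nat) (b : List (List Int)) : List (List (List Int)) :=
  (List.range cols).map (fun j =>
    (col_perms.getD j []).filter (fun q =>
      (List.range r).all (fun i => q.getD i 0 == (b.getD i []).getD j 0)))

-- row permutations have the right length at every row reachable from row r0 without
-- crossing a row whose permutation list is empty (where the search necessarily dies)
def pvRowOk (rp : List (List (List Int))) (cols r0 : Nat) : Prop :=
  ∀ r', r0 ≤ r' → (∀ i, r0 ≤ i → i < r' → rp.getD i [] ≠ []) →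
    ∀ p ∈ rp.getD r' [], p.length = cols

-- relation between an A-frontier board at row k and the corresponding B-frontier node
def pvRelk (cp : List (List (List Int))) (rows cols k : Nat)
    (b : List (List Int)) (bs : List (List Int) × List (List (List Int))) : Prop :=
  bs.1 = b ∧ b.length = rows ∧ (∀ row ∈ b, row.length = cols) ∧ bs.2 = pvSurvSpec cp cols k b

-- remaining fuel budget: product of (|row perms| + 1) over the rows not yet filled
def pvPT (rp : List (List (List Int))) (k : Nat) : Nat :=
  ((rp.drop k).map (fun ps => ps.length + 1)).prod

theorem pv_any_eq_not_isEmpty_filter {α : Type} (l : List α) (p : α → Bool) :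
    l.any p = !(l.filter p).isEmpty := by
  induction l with
  | nil => rfl
  | cons a t ih => by_cases h : p a <;> simp [List.any_cons, h, ih]

-- every permutation produced for nonnegative clues has exactly the requested length
theorem pvGpAux_length (n : Nat) : ∀ (clues : List Int) (len : Int),
    clues.length ≤ n → (∀ x ∈ clues, 0 ≤ x) → 0 ≤ len →
    ∀ p ∈ pvGpAux n clues len, p.length = len.toNat := by
  induction n with
  | zero =>
    intro clues len hn _ _ p hp
    match clues with
    | [] => simp [pvGpAux] at hp; simp [hp]
    | _ :: _ => simp at hn
  | succ n ih =>
    intro clues len hn hnn hlen p hp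
    match clues with
    | [] => simp [pvGpAux] at hp; simp [hp]
    | c :: rest =>
      simp only [pvGpAux] at hp
      rw [PySem.List.foldl_append_eq_flatMap] at hp
      simp only [List.nil_append, List.mem_flatMap] at hp
      obtain ⟨i, hi, hp⟩ := hp
      rw [PySem.List.mem_pyRange_one] at hi
      obtain ⟨hi1, hi2⟩ := hi
      have hc : 0 ≤ c := hnn c (by simp)
      have hrest : ∀ x ∈ rest, 0 ≤ x := fun x hx => hnn x (by simp [hx])
      have hsum : 0 ≤ rest.sum := List.sum_nonneg hrest
      by_cases hr : rest = []
      · rw [if_pos hr] at hp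
        simp only [List.mem_singleton] at hp
        subst hp
        rw [hr] at hi2
        simp only [List.length_append, List.length_replicate, List.sum_nil,
          List.length_nil, Nat.cast_zero] at hi2 ⊢
        push_cast at hi2 ⊢
        omega
      · rw [if_neg hr] at hp
        simp only [List.mem_map] at hp
        obtain ⟨r, hrmem, hpr⟩ := hp
        have hrl : 1 ≤ (rest.length : Int) := by
          have := List.length_pos_iff.mpr hr
          omega
        have hlen' : (0:Int) ≤ len - (((List.replicate i.toNat (-1:Int) ++ List.replicate c.toNat 1).length : Int)) - 1 := by
          simp only [List.length_append, List.length_replicate]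
          push_cast
          omega
        have hlr := ih rest _ (by simpa using Nat.le_of_succ_le_succ hn) hrest hlen' r hrmem
        simp only [List.length_append, List.length_replicate] at hlr hlen'
        push_cast at hlr hlen'
        subst hpr
        simp only [List.length_append, List.length_replicate, List.length_cons,
          List.length_nil, hlr]
        omega

theorem pvGetPermutations_length (clues : List Int) (len : Int)
    (hnn : ∀ x ∈ clues, 0 ≤ x) (hlen : 0 ≤ len) :
    ∀ p ∈ pvGetPermutations clues len, p.length = len.toNat :=
  pvGpAux_length clues.length clues len le_rfl hnn hlen

-- the initial survivors are the full column-permutation lists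
theorem pvSurvSpec_zero (cp : List (List (List Int))) (cols : Nat) (b : List (List Int))
    (hlen : cp.length = cols) : pvSurvSpec cp cols 0 b = cp := by
  apply List.ext_getElem
  · simp [pvSurvSpec, hlen]
  · intro j h1 h2
    simp [pvSurvSpec, List.range_zero, List.filter_true, List.getD,
      List.getElem?_eq_getElem h2]

-- simp-shape of getD after set (used at indices below/at the set position)
theorem pv_getD_set_ne (l : List (List Int)) (n m : Nat) (a : List Int) (h : ¬ n = m) :
    (l.set n a).getD m [] = l.getD m [] := by
  simp [List.getD, h]

theorem pv_getD_set_self (l : List (List Int)) (n : Nat) (a : List Int) (h : n < l.length) :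
    (l.set n a).getD n [] = a := by
  simp [List.getD, h]

theorem pv_headD_set (b : List (List Int)) (r : Nat) (p : List Int) (cols : Nat)
    (hb : 0 < b.length) (hrow : ∀ row ∈ b, row.length = cols) (hp : p.length = cols) :
    ((b.set r p).headD []).length = cols := by
  cases b with
  | nil => simp at hb
  | cons x xs =>
    cases r with
    | zero => simpa [List.set] using hp
    | succ k => simpa [List.set] using hrow x (by simp)

theorem pv_all_range_congr (r : Nat) (f g : Nat → Bool) (h : ∀ i < r, f i = g i) :
    (List.range r).all f = (List.range r).all g := by
  induction r with
  | zero => rfl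
  | succ k ih =>
    rw [List.range_succ]
    simp [List.all_append, ih (fun i hi => h i (by omega)), h k (by omega)]

-- one column: "some permutation matches rows 0..r-1 and row r" vs "the filtered survivors are nonempty"
theorem pv_col_eq (l : List (List Int)) (prev nw : List Int → Bool) :
    l.any (fun q => prev q && nw q) = !((l.filter prev).filter nw).isEmpty := by
  rw [List.filter_filter, ← pv_any_eq_not_isEmpty_filter]
  have h : (fun q => nw q && prev q) = (fun q => prev q && nw q) := funext fun q => Bool.and_comm _ _
  rw [h]

-- splitting "consistent with rows 0..r of b.set r p" into "rows 0..r-1 of b" and "row r is p"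
theorem pv_all_succ_set (b : List (List Int)) (r j : Nat) (p q : List Int) (hr : r < b.length) :
    (List.range (r + 1)).all (fun i => q.getD i 0 == ((b.set r p).getD i []).getD j 0) =
      ((List.range r).all (fun i => q.getD i 0 == (b.getD i []).getD j 0) &&
        (q.getD r 0 == p.getD j 0)) := by
  rw [List.range_succ, List.all_append]
  simp only [List.all_cons, List.all_nil, Bool.and_true, pv_getD_set_self b r p hr]
  congr 1
  exact pv_all_range_congr r _ _ (fun i hi => by rw [pv_getD_set_ne b r i p (by omega)])

-- the filtered survivors are the survivors of the new board
theorem pvSurvSpec_succ (cp : List (List (List Int))) (cols r : Nat)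
    (b : List (List Int)) (p : List Int) (hr : r < b.length) :
    (List.range cols).map (fun j =>
        ((pvSurvSpec cp cols r b).getD j []).filter (fun q => q.getD r 0 == p.getD j 0))
      = pvSurvSpec cp cols (r+1) (b.set r p) := by
  unfold pvSurvSpec
  refine List.map_congr_left (fun j hj => ?_)
  have hj' : j < cols := List.mem_range.mp hj
  rw [PySem.List.getD_map_range _ _ _ _ hj', List.filter_filter]
  refine (List.filter_congr (fun q _ => ?_)).symm
  rw [pv_all_succ_set b r j p q hr, Bool.and_comm]

-- the key step: A's full rescan of rows 0..r equals B's one-row filter of the survivors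
theorem pv_valid_eq (cp : List (List (List Int))) (cols r : Nat)
    (b : List (List Int)) (p : List Int)
    (hrow : ∀ row ∈ b, row.length = cols)
    (hp : p.length = cols) (hr : r < b.length) :
    pvIsValid (b.set r p) cp r =
      ((List.range cols).map (fun j =>
        ((pvSurvSpec cp cols r b).getD j []).filter (fun q => q.getD r 0 == p.getD j 0))).all
        (fun s => !s.isEmpty) := by
  unfold pvIsValid
  rw [pv_headD_set b r p cols (by omega) hrow hp, List.all_map]
  refine pv_all_range_congr cols _ _ (fun j hj => ?_)
  have e1 : (pvSurvSpec cp cols r b).getD j [] =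
      (cp.getD j []).filter (fun q =>
        (List.range r).all (fun i => q.getD i 0 == (b.getD i []).getD j 0)) := by
    unfold pvSurvSpec
    exact PySem.List.getD_map_range _ _ _ _ hj
  show (cp.getD j []).any _ =
    !(((pvSurvSpec cp cols r b).getD j []).filter (fun q => q.getD r 0 == p.getD j 0)).isEmpty
  rw [e1, ← pv_col_eq]
  refine List.any_congr rfl (fun q => ?_)
  rw [← pv_all_succ_set b r j p q hr, List.all_map]
  exact List.all_congr rfl (fun i => rfl)

theorem pv_forall₂_append {α β : Type} (R : α → β → Prop) {l1 l3 : List α} {l2 l4 : List β}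
    (h1 : List.Forall₂ R l1 l2) (h2 : List.Forall₂ R l3 l4) :
    List.Forall₂ R (l1 ++ l3) (l2 ++ l4) := by
  induction h1 with
  | nil => simpa using h2
  | cons hx ht ih => exact List.Forall₂.cons hx ih

-- a row whose clues cannot fit has no permutations at all
theorem pvGetPermutations_nil (c : List Int) (cols : Nat)
    (h : c.sum + (c.length : Int) ≥ (cols : Int) + 2) :
    pvGetPermutations c (cols : Int) = [] := by
  match c with
  | [] => simp at h; omega
  | c0 :: rest =>
    show pvGpAux (rest.length + 1) (c0 :: rest) (cols : Int) = []
    rw [pvGpAux]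
    have hb : (cols : Int) - c0 - (rest.sum + (rest.length : Int)) + 1 ≤ 0 := by
      simp [List.sum_cons] at h
      omega
    rw [show PySem.List.pyRange 0 ((cols : Int) - c0 - (rest.sum + (rest.length : Int)) + 1) 1 = [] from by
      rw [PySem.List.pyRange_one]
      simp [Int.toNat_of_nonpos (by omega)]]
    rfl

-- processing one whole level of A's queue: visits recorded, children appended behind acc
theorem pv_levelA_step (rp cp : List (List (List Int))) (rows k : Nat) (hk : k < rows) :
    ∀ (items : List (List (List Int))) (acc : List (Nat × List (List Int)))
      (gh : List (List (List Int))) (ah : List String) (fuel : Nat),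
    pvLoopA rp cp rows (fuel + items.length) (items.map (fun b => (k, b)) ++ acc) gh ah
      = pvLoopA rp cp rows fuel
          (acc ++ items.flatMap (fun b =>
            (((rp.getD k []).filter (fun p => pvIsValid (b.set k p) cp k)).map
              (fun p => b.set k p)).map (fun nb => (k + 1, nb))))
          (if 0 < k then gh ++ items else gh)
          (if 0 < k then ah ++ items.map (fun _ => pvVisitMsg k) else ah) := by
  intro items
  induction items with
  | nil =>
    intro acc gh ah fuel
    simp
  | cons b items ih =>
    intro acc gh ah fuel
    have hne : ¬ (k = rows) := Nat.ne_of_lt hk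
    simp only [List.length_cons, List.map_cons, List.cons_append, ← Nat.add_assoc]
    rw [pvLoopA]
    simp only [hne, if_false, PySem.List.foldl_append_if, List.nil_append, List.append_assoc]
    rw [ih]
    by_cases hk0 : 0 < k <;>
      simp [hk0, List.flatMap_cons, List.append_assoc, Function.comp_def]

-- lifting a pointwise Forall₂ through flatMap
theorem pv_forall₂_flatMap {α β γ δ : Type} (R : α → β → Prop) (S : γ → δ → Prop)
    {l1 : List α} {l2 : List β} (f : α → List γ) (g : β → List δ)
    (h : List.Forall₂ R l1 l2) (hfg : ∀ a b, R a b → List.Forall₂ S (f a) (g b)) :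
    List.Forall₂ S (l1.flatMap f) (l2.flatMap g) := by
  induction h with
  | nil => exact List.Forall₂.nil
  | cons hx ht ih => exact pv_forall₂_append S (hfg _ _ hx) ih

-- filter-map on one side vs flatMap of singletons/empties on the other
theorem pv_forall₂_filter_map {α β γ : Type} (S : β → γ → Prop)
    (l : List α) (P : α → Bool) (f : α → β) (g : α → List γ)
    (h : ∀ x ∈ l, (P x = true → ∃ y, g x = [y] ∧ S (f x) y) ∧ (P x = false → g x = [])) :
    List.Forall₂ S ((l.filter P).map f) (l.flatMap g) := by
  induction l with
  | nil => exact List.Forall₂.nil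
  | cons x t ih =>
    have hx := h x (by simp)
    have ht := ih (fun y hy => h y (by simp [hy]))
    by_cases hP : P x
    · obtain ⟨y, hgy, hS⟩ := hx.1 hP
      simp only [List.flatMap_cons, List.filter_cons, hP, if_pos, List.map_cons, hgy]
      exact List.Forall₂.cons hS ht
    · simp only [List.flatMap_cons, List.filter_cons, Bool.not_eq_true] at *
      rw [hx.2 (by simpa using hP)]
      simpa [hP] using ht

-- first components of a related B-level are the A-level boards
theorem pv_fst_eq (cp : List (List (List Int))) (rows cols k : Nat)
    {lA : List (List (List Int))} {lB : List (List (List Int) × List (List (List Int)))}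
    (h : List.Forall₂ (pvRelk cp rows cols k) lA lB) : lB.map (fun bs => bs.1) = lA := by
  induction h with
  | nil => rfl
  | cons hx ht ih => simp [ih, hx.1]

theorem pvPT_pos (rp : List (List (List Int))) (k : Nat) : 0 < pvPT rp k := by
  unfold pvPT
  apply List.prod_pos
  intro a ha
  obtain ⟨ps, _, rfl⟩ := List.mem_map.mp ha
  omega

theorem pvPT_succ (rp : List (List (List Int))) (k : Nat) (hk : k < rp.length) :
    pvPT rp k = ((rp.getD k []).length + 1) * pvPT rp (k + 1) := by
  unfold pvPT
  rw [List.drop_eq_getElem_cons hk, List.map_cons, List.prod_cons,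
    List.getD_eq_getElem _ _ hk]

-- the main simulation: A's queue loop on one level equals B's level recursion
theorem pv_main (rp cp : List (List (List Int))) (rows cols : Nat) (hrp : rp.length = rows) :
    ∀ (n k : Nat) (levelA : List (List (List Int)))
      (levelB : List (List (List Int) × List (List (List Int))))
      (gh : List (List (List Int))) (ah : List String) (fuel : Nat),
    k + n = rows → levelA ≠ [] →
    List.Forall₂ (pvRelk cp rows cols k) levelA levelB →
    pvRowOk rp cols k →
    (n + 2) * levelA.length * pvPT rp k ≤ fuel →
    pvLoopA rp cp rows fuel (levelA.map (fun b => (k, b))) gh ah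
      = pvLoopB rp rows cols n k levelB gh ah := by
  intro n
  induction n with
  | zero =>
    intro k levelA levelB gh ah fuel hkn hne hrel hrow hfuel
    have hk : k = rows := by omega
    subst hk
    cases hrel with
    | nil => exact absurd rfl hne
    | @cons b bs tA tB hx ht =>
      obtain ⟨h1, _, _, _⟩ := hx
      have hT := pvPT_pos rp k
      have hf1 : 1 ≤ fuel := by
        have h := Nat.mul_pos (Nat.mul_pos (show 0 < 0 + 2 by omega)
          (show 0 < (b :: tA).length by simp)) hT
        omega
      obtain ⟨f, rfl⟩ : ∃ f, fuel = f + 1 := ⟨fuel - 1, by omega⟩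
      rw [List.map_cons, pvLoopA, pvLoopB]
      simp [h1]
  | succ n ih =>
    intro k levelA levelB gh ah fuel hkn hne hrel hrow hfuel
    have hk : k < rows := by omega
    have hkrp : k < rp.length := by omega
    have hT : 1 ≤ pvPT rp (k + 1) := pvPT_pos rp (k + 1)
    have hm : 1 ≤ levelA.length := List.length_pos_iff.mpr hne
    have hPT : pvPT rp k = ((rp.getD k []).length + 1) * pvPT rp (k + 1) := pvPT_succ rp k hkrp
    have hfm : levelA.length + 1 ≤ fuel := by
      have hx : 0 < ((rp.getD k []).length + 1) * pvPT rp (k + 1) :=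
        Nat.mul_pos (by omega) (pvPT_pos rp (k + 1))
      calc levelA.length + 1 ≤ 2 * levelA.length := by omega
        _ = 2 * levelA.length * 1 := by ring
        _ ≤ (n + 1 + 2) * levelA.length * (((rp.getD k []).length + 1) * pvPT rp (k + 1)) :=
            Nat.mul_le_mul (Nat.mul_le_mul_right _ (by omega)) hx
        _ ≤ fuel := by rw [hPT] at hfuel; exact hfuel
    -- one level of A's loop
    have hstep := pv_levelA_step rp cp rows k hk levelA [] gh ah (fuel - levelA.length)
    rw [List.append_nil, List.nil_append, Nat.sub_add_cancel (by omega)] at hstep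
    rw [hstep, pvLoopB]
    -- relate the two next frontiers
    have hlenp : ∀ p ∈ rp.getD k [], p.length = cols :=
      hrow k le_rfl (fun i hi1 hi2 => absurd hi2 (by omega))
    have hrel' : List.Forall₂ (pvRelk cp rows cols (k + 1))
        (levelA.flatMap (fun b =>
          ((rp.getD k []).filter (fun p => pvIsValid (b.set k p) cp k)).map (fun p => b.set k p)))
        (levelB.flatMap (fun bs => (rp.getD k []).flatMap (fun p => pvChildB cols k bs p))) := by
      refine pv_forall₂_flatMap _ _ _ _ hrel (fun b bs hbbs => ?_)
      obtain ⟨h1, h2, h3, h4⟩ := hbbs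
      refine pv_forall₂_filter_map _ _ _ _ _ (fun p hp => ?_)
      have hguard : ((List.range cols).map (fun j =>
          (bs.2.getD j []).filter (fun q => q.getD k 0 == p.getD j 0))).all (fun s => !s.isEmpty)
          = pvIsValid (b.set k p) cp k := by
        rw [h4, pv_valid_eq cp cols k b p h3 (hlenp p hp) (by omega)]
      constructor
      · intro hPv
        refine ⟨(bs.1.take k ++ [p] ++ bs.1.drop (k + 1),
          (List.range cols).map (fun j =>
            (bs.2.getD j []).filter (fun q => q.getD k 0 == p.getD j 0))), ?_, ?_, ?_, ?_, ?_⟩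
        · simp only [pvChildB, hguard, hPv, if_pos]
        · show bs.1.take k ++ [p] ++ bs.1.drop (k + 1) = b.set k p
          rw [h1, List.set_eq_take_cons_drop p (show k < b.length by omega)]
          simp
        · simp [h2]
        · intro row hrw
          rcases List.mem_or_eq_of_mem_set hrw with h' | h'
          · exact h3 row h'
          · rw [h']; exact hlenp p hp
        · show _ = pvSurvSpec cp cols (k + 1) (b.set k p)
          rw [h4, pvSurvSpec_succ cp cols k b p (by omega)]
      · intro hPv
        simp only [pvChildB, hguard, hPv]
        simp
    by_cases hnil : levelB.flatMap (fun bs => (rp.getD k []).flatMap (fun p => pvChildB cols k bs p)) = []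
    · have hAnil : levelA.flatMap (fun b =>
          ((rp.getD k []).filter (fun p => pvIsValid (b.set k p) cp k)).map (fun p => b.set k p)) = [] := by
        have := hrel'.length_eq
        rw [hnil] at this
        exact List.length_eq_zero_iff.mp this
      rw [if_pos hnil]
      have : levelA.flatMap (fun b =>
          (((rp.getD k []).filter (fun p => pvIsValid (b.set k p) cp k)).map
            (fun p => b.set k p)).map (fun nb => (k + 1, nb))) = [] := by
        rw [← List.map_flatMap, hAnil]
        rfl
      rw [this]
      obtain ⟨f, hf⟩ : ∃ f, fuel - levelA.length = f + 1 := ⟨fuel - levelA.length - 1, by omega⟩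
      rw [hf, pvLoopA, pv_fst_eq cp rows cols k hrel]
      have hah : levelA.map (fun _ => pvVisitMsg k) = levelB.map (fun _ => pvVisitMsg k) := by
        simp [List.map_const', hrel.length_eq]
      rw [hah]
    · rw [if_neg hnil]
      have hAne : levelA.flatMap (fun b =>
          ((rp.getD k []).filter (fun p => pvIsValid (b.set k p) cp k)).map (fun p => b.set k p)) ≠ [] := by
        intro hcon
        apply hnil
        have := hrel'.length_eq
        rw [hcon] at this
        exact List.length_eq_zero_iff.mp this.symm
      have hps : rp.getD k [] ≠ [] := by
        intro hcon
        apply hAne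
        rw [hcon]
        simp
      have hrow' : pvRowOk rp cols (k + 1) := by
        intro r'' hge hchain
        refine hrow r'' (by omega) (fun i hi1 hi2 => ?_)
        by_cases hi : i = k
        · rw [hi]; exact hps
        · exact hchain i (by omega) hi2
      have hlen' : (levelA.flatMap (fun b =>
          ((rp.getD k []).filter (fun p => pvIsValid (b.set k p) cp k)).map (fun p => b.set k p))).length
          ≤ levelA.length * (rp.getD k []).length := by
        rw [List.length_flatMap]
        calc (levelA.map (fun b =>
              (((rp.getD k []).filter (fun p => pvIsValid (b.set k p) cp k)).map
                (fun p => b.set k p)).length)).sum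
            ≤ (levelA.map (fun b =>
              (((rp.getD k []).filter (fun p => pvIsValid (b.set k p) cp k)).map
                (fun p => b.set k p)).length)).length * (rp.getD k []).length := by
              refine List.sum_le_card_nsmul _ _ (fun x hx => ?_)
              obtain ⟨b, _, rfl⟩ := List.mem_map.mp hx
              simpa using List.length_filter_le _ _
          _ = levelA.length * (rp.getD k []).length := by simp
      have hfb : (n + 2) * (levelA.flatMap (fun b =>
          ((rp.getD k []).filter (fun p => pvIsValid (b.set k p) cp k)).map (fun p => b.set k p))).length
          * pvPT rp (k + 1) ≤ fuel - levelA.length := by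
        rw [hPT] at hfuel
        have h1 : (n + 2) * (levelA.flatMap (fun b =>
            ((rp.getD k []).filter (fun p => pvIsValid (b.set k p) cp k)).map (fun p => b.set k p))).length
            * pvPT rp (k + 1)
            ≤ (n + 2) * (levelA.length * (rp.getD k []).length) * pvPT rp (k + 1) := by
          exact Nat.mul_le_mul_right _ (Nat.mul_le_mul_left _ hlen')
        have e : (n + 1 + 2) * levelA.length * (((rp.getD k []).length + 1) * pvPT rp (k + 1)) =
            (n + 2) * (levelA.length * (rp.getD k []).length) * pvPT rp (k + 1) +
              (levelA.length * (rp.getD k []).length * pvPT rp (k + 1) +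
                (n + 3) * (levelA.length * pvPT rp (k + 1))) := by ring
        rw [e] at hfuel
        have h3 : levelA.length ≤ (n + 3) * (levelA.length * pvPT rp (k + 1)) := by
          calc levelA.length = levelA.length * 1 := (Nat.mul_one _).symm
            _ ≤ levelA.length * pvPT rp (k + 1) := Nat.mul_le_mul_left _ hT
            _ ≤ (n + 3) * (levelA.length * pvPT rp (k + 1)) := Nat.le_mul_of_pos_left _ (by omega)
        omega
      rw [← List.map_flatMap, pv_fst_eq cp rows cols k hrel]
      have hah : levelA.map (fun _ => pvVisitMsg k) = levelB.map (fun _ => pvVisitMsg k) := by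
        simp [List.map_const', hrel.length_eq]
      rw [← hah]
      exact ih (k + 1) _ _ _ _ _ (by omega) hAne hrel' hrow' hfb

theorem pv_foldl_prod (l : List (List (List Int))) (a : Nat) :
    l.foldl (fun a ps => a * (ps.length + 1)) a = a * (l.map (fun ps => ps.length + 1)).prod := by
  induction l generalizing a with
  | nil => simp
  | cons x t ih => simp [ih, Nat.mul_assoc]

-- ===== VERDICT (by name: the statement is the Claim_ definition above) =====
theorem solve_nonogram_brfs_spec : Claim_equal_solve_nonogram_brfs := by
  intro row_clues col_clues _ hpre
  unfold Spec_solve_nonogram_brfs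
  simp only [solve_nonogram_brfs, solve_nonogram_brfs_alt]
  rw [pv_foldl_prod]
  have h := pv_main (row_clues.map (fun c => pvGetPermutations c (col_clues.length : Int)))
    (col_clues.map (fun c => pvGetPermutations c (row_clues.length : Int)))
    row_clues.length col_clues.length (by simp) row_clues.length 0
    [List.replicate row_clues.length (List.replicate col_clues.length (0 : Int))]
    [(List.replicate row_clues.length (List.replicate col_clues.length (0 : Int)),
      col_clues.map (fun c => pvGetPermutations c (row_clues.length : Int)))]
    [List.replicate row_clues.length (List.replicate col_clues.length (0 : Int))]
    [pvStartMsg]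
    ((row_clues.length + 2) *
      (1 * ((row_clues.map (fun c => pvGetPermutations c (col_clues.length : Int))).map
        (fun ps => ps.length + 1)).prod))
    (by omega) (by simp) ?_ ?_ ?_
  · simpa using h
  -- the single initial node is related
  · refine List.Forall₂.cons ⟨rfl, by simp, ?_, ?_⟩ List.Forall₂.nil
    · intro row hrw
      rw [List.eq_of_mem_replicate hrw]
      simp
    · exact (pvSurvSpec_zero _ _ _ (by simp)).symm
  -- pvRowOk at row 0, from each disjunct of Pre_
  · intro r' _ hchain p hp
    by_cases hlt : r' < row_clues.length
    · rw [List.getD_eq_getElem _ _ (by simpa using hlt), List.getElem_map] at hp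
      rcases hpre with ⟨h1, _⟩ | h0 | ⟨k, hk, _, hbelow, hblock⟩
      · have := pvGetPermutations_length (row_clues[r']'(by omega)) (col_clues.length : Int)
          (h1 _ (List.getElem_mem _)) (by positivity) p hp
        simpa using this
      · rw [h0] at hlt; simp at hlt
      · rcases Nat.lt_trichotomy r' k with hc | hc | hc
        · have hnn : ∀ x ∈ row_clues[r'], 0 ≤ x := by
            have := hbelow r' hc
            rwa [List.getD_eq_getElem _ _ (by omega)] at this
          have := pvGetPermutations_length (row_clues[r']'(by omega)) (col_clues.length : Int)
            hnn (by positivity) p hp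
          simpa using this
        · exfalso
          subst hc
          rw [List.getD_eq_getElem _ _ (by omega)] at hblock
          rw [pvGetPermutations_nil _ _ hblock] at hp
          simp at hp
        · exfalso
          refine hchain k (Nat.zero_le _) (by omega) ?_
          rw [List.getD_eq_getElem _ _ (by simpa using hk), List.getElem_map]
          rw [List.getD_eq_getElem _ _ (by omega)] at hblock
          rw [pvGetPermutations_nil _ _ hblock]
    · rw [List.getD_eq_default _ _ (by simpa using Nat.le_of_not_lt hlt)] at hp
      simp at hp
  -- the fuel budget is exactly A's fuel
  · simp [pvPT]
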